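-- pv_equiv track=rewrite | github.com/murathankarasu/Recommend-Service | src/app.py | has_interaction_with_posts
-- ===== SOURCE A (Python) =====
-- def has_interaction_with_posts(user_interactions, post_ids):
--     """
--     Belirtilen post_ids listesindeki içeriklere kullanıcı etkileşimi olmuş mu kontrol eder.
--     Sadece like, comment, emotion gibi etkileşimler dikkate alınır.
--     """
--     post_ids_set = set(post_ids)
--     valid_types = {'like', 'comment', 'emotion'}
--     for interaction in user_interactions:
--         pid = interaction.get('postId') or interaction.get('content_id') or interaction.get('id')
--         if pid in post_ids_set:
--             if interaction.get('interactionType') in valid_types: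
--                 return True
--     return False
-- ===== SOURCE B (Python) =====
-- def has_interaction_with_posts(user_interactions, post_ids):
--     """Sort-and-merge: sort the valid interactions' pids and the post ids, then a two-pointer sweep."""
--     cand = sorted(
--         pid
--         for pid in (
--             it.get('postId') or it.get('content_id') or it.get('id')
--             for it in user_interactions
--             if it.get('interactionType') in ('like', 'comment', 'emotion')
--         )
--         if pid is not None
--     )
--     targets = sorted(post_ids)
--     i = j = 0
--     while i < len(cand) and j < len(targets):
--         if cand[i] == targets[j]:
--             return True
--         if cand[i] < targets[j]:
--             i += 1
--         else:
--             j += 1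
--     return False
-- ===== Notes on version B (the rewrite author's own statement) =====
-- stated objective: alternative
-- what changed: Replaces the hash-set membership scan with sort-and-merge: B extracts the pids of valid-type interactions, sorts them and the post ids, and decides by a two-pointer merge sweep looking for a common element; no sets or hashing at all.
import Mathlib
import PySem

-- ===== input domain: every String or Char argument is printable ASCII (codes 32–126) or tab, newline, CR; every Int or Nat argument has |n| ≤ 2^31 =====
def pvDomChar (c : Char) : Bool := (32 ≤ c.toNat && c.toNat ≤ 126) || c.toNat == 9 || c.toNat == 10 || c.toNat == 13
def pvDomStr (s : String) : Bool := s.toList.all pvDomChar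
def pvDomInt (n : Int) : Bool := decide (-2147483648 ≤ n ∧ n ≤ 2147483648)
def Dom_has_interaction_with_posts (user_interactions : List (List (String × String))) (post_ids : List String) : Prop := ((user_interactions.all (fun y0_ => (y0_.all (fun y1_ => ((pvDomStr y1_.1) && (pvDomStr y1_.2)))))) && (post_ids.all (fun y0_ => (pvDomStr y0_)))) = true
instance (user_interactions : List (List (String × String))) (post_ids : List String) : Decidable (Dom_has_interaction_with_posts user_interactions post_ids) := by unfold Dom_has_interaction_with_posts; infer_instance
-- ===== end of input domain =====

-- B replaces the hash-set scan with sort-and-merge: sort the valid interactions' pids and the post ids, then a two-pointer sweep (alternative algorithm, similar cost).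
-- Shared helper for the pid expression both Pythons contain verbatim:
-- Python's `x or y` on optional strings: falsy (missing key or empty string) falls through.
def pyOrS (x y : Option String) : Option String :=
  match x with
  | some s => if s = "" then y else some s
  | none => y

-- pid = interaction.get('postId') or interaction.get('content_id') or interaction.get('id')
def pidOf (interaction : List (String × String)) : Option String :=
  pyOrS (pyOrS ((PySem.Dict.mk interaction).get? "postId") ((PySem.Dict.mk interaction).get? "content_id"))
    ((PySem.Dict.mk interaction).get? "id")

-- ===== PORT A =====
-- interaction.get('interactionType') in valid_types  (a set; None is never in a set of strings)
def typeOkA (interaction : List (String × String)) : Bool :=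
  match (PySem.Dict.mk interaction).get? "interactionType" with
  | some t => PySem.Set.contains (PySem.Set.ofList ["like", "comment", "emotion"]) t
  | none => false

-- pid in post_ids_set (None is never in a set of strings)
def pidIn (pset : PySem.Set String) (interaction : List (String × String)) : Bool :=
  match pidOf interaction with
  | some s => PySem.Set.contains pset s
  | none => false

-- A's for-loop with early return True
def aLoop (pset : PySem.Set String) : List (List (String × String)) → Bool
  | [] => false
  | interaction :: rest =>
    if pidIn pset interaction then
      if typeOkA interaction then true else aLoop pset rest
    else aLoop pset rest

def has_interaction_with_posts (user_interactions : List (List (String × String))) (post_ids : List String) : Bool :=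
  aLoop (PySem.Set.ofList post_ids) user_interactions

-- ===== PORT B =====
-- interaction.get('interactionType') in ('like', 'comment', 'emotion')  (tuple membership; None matches nothing)
def typeOkB (interaction : List (String × String)) : Bool :=
  match (PySem.Dict.mk interaction).get? "interactionType" with
  | some t => t == "like" || t == "comment" || t == "emotion"
  | none => false

-- cand = sorted(pid for pid in (<or-chain> for it in user_interactions if <type ok>) if pid is not None)
def bCand (user_interactions : List (List (String × String))) : List String :=
  PySem.List.sorted ((user_interactions.filter (fun it => typeOkB it)).filterMap (fun it => pidOf it))
    (fun x => x) false

-- the two-pointer while-loop over the two sorted lists, as recursion on the remaining suffixes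
def bMerge : List String → List String → Bool
  | [], _ => false
  | _ :: _, [] => false
  | a :: as, b :: bs =>
    if a = b then true
    else if a < b then bMerge as (b :: bs)
    else bMerge (a :: as) bs
termination_by l1 l2 => l1.length + l2.length

def has_interaction_with_posts_alt (user_interactions : List (List (String × String))) (post_ids : List String) : Bool :=
  bMerge (bCand user_interactions) (PySem.List.sorted post_ids (fun x => x) false)

-- ===== PRECONDITION & SPEC =====
def Spec_has_interaction_with_posts (user_interactions : List (List (String × String))) (post_ids : List String) (out : Bool) : Prop := out = has_interaction_with_posts_alt user_interactions post_ids
instance (user_interactions : List (List (String × String))) (post_ids : List String) (out : Bool) : Decidable (Spec_has_interaction_with_posts user_interactions post_ids out) := by unfold Spec_has_interaction_with_posts; infer_instance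

-- ===== CLAIM =====
def Claim_equal_has_interaction_with_posts : Prop := ∀ (user_interactions : List (List (String × String))) (post_ids : List String), Dom_has_interaction_with_posts user_interactions post_ids → Spec_has_interaction_with_posts user_interactions post_ids (has_interaction_with_posts user_interactions post_ids)

-- ===== LEMMAS AND PROOFS =====

-- the two ports' type tests (set vs tuple membership) agree
theorem typeOk_eq (it : List (String × String)) : typeOkA it = typeOkB it := by
  unfold typeOkA typeOkB
  cases (PySem.Dict.mk it).get? "interactionType" with
  | none => rfl
  | some t =>
    simp only [PySem.Set.contains, PySem.Set.ofList, PySem.Set.add, PySem.Set.empty]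
    rw [Bool.eq_iff_iff]
    simp [or_assoc]

-- A's loop returns True iff some interaction passes both tests.
theorem aLoop_iff (pset : PySem.Set String) (l : List (List (String × String))) :
    aLoop pset l = true ↔ ∃ it ∈ l, pidIn pset it = true ∧ typeOkA it = true := by
  induction l with
  | nil => simp [aLoop]
  | cons it rest ih =>
    simp only [aLoop]
    by_cases h1 : pidIn pset it = true
    · by_cases h2 : typeOkA it = true
      · simp [h1, h2]
      · simp [h1, h2, ih]
    · simp [h1, ih]

-- membership in B's candidate list
theorem mem_bCand (uis : List (List (String × String))) (x : String) :
    x ∈ bCand uis ↔ ∃ it ∈ uis, typeOkB it = true ∧ pidOf it = some x := by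
  unfold bCand
  rw [PySem.List.mem_sorted]
  simp only [List.mem_filterMap, List.mem_filter]
  constructor
  · rintro ⟨it, ⟨hm, hty⟩, hp⟩; exact ⟨it, hm, hty, hp⟩
  · rintro ⟨it, hm, hty, hp⟩; exact ⟨it, ⟨hm, hty⟩, hp⟩

-- the merge sweep is sound without any sortedness assumption
theorem bMerge_sound (n : Nat) : ∀ (l1 l2 : List String), l1.length + l2.length ≤ n →
    bMerge l1 l2 = true → ∃ x, x ∈ l1 ∧ x ∈ l2 := by
  induction n with
  | zero =>
    intro l1 l2 hn h
    match l1, l2 with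
    | [], _ => simp [bMerge] at h
    | _ :: _, _ => simp at hn
  | succ n ih =>
    intro l1 l2 hn h
    match l1, l2 with
    | [], _ => simp [bMerge] at h
    | _ :: _, [] => simp [bMerge] at h
    | a :: as, b :: bs =>
      simp only [bMerge] at h
      by_cases hab : a = b
      · exact ⟨a, by simp, by simp [hab]⟩
      · rw [if_neg hab] at h
        by_cases hlt : a < b
        · rw [if_pos hlt] at h
          rcases ih as (b :: bs) (by simp at hn ⊢; omega) h with ⟨x, hx1, hx2⟩
          exact ⟨x, List.mem_cons_of_mem _ hx1, hx2⟩
        · rw [if_neg hlt] at h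
          rcases ih (a :: as) bs (by simp at hn ⊢; omega) h with ⟨x, hx1, hx2⟩
          exact ⟨x, hx1, List.mem_cons_of_mem _ hx2⟩

-- on two sorted lists the merge sweep finds any common element
theorem bMerge_complete (n : Nat) : ∀ (l1 l2 : List String), l1.length + l2.length ≤ n →
    l1.Pairwise (· ≤ ·) → l2.Pairwise (· ≤ ·) →
    ∀ x, x ∈ l1 → x ∈ l2 → bMerge l1 l2 = true := by
  induction n with
  | zero =>
    intro l1 l2 hn _ _ x hx1 _
    match l1 with
    | [] => simp at hx1
    | _ :: _ => simp at hn
  | succ n ih =>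
    intro l1 l2 hn h1 h2 x hx1 hx2
    match l1, l2 with
    | [], _ => simp at hx1
    | _ :: _, [] => simp at hx2
    | a :: as, b :: bs =>
      simp only [bMerge]
      by_cases hab : a = b
      · simp [hab]
      · rw [if_neg hab]
        rcases List.pairwise_cons.mp h1 with ⟨ha, h1'⟩
        rcases List.pairwise_cons.mp h2 with ⟨hb, h2'⟩
        by_cases hlt : a < b
        · rw [if_pos hlt]
          have hxas : x ∈ as := by
            rcases List.mem_cons.mp hx1 with rfl | h
            · rcases List.mem_cons.mp hx2 with rfl | h'
              · exact absurd rfl hab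
              · exact absurd hlt (not_lt.mpr (hb _ h'))
            · exact h
          exact ih as (b :: bs) (by simp at hn ⊢; omega) h1' h2 x hxas hx2
        · rw [if_neg hlt]
          have hba : b < a := lt_of_le_of_ne (not_lt.mp hlt) (fun h => hab h.symm)
          have hxbs : x ∈ bs := by
            rcases List.mem_cons.mp hx2 with rfl | h
            · rcases List.mem_cons.mp hx1 with rfl | h'
              · exact absurd rfl hab
              · exact absurd (lt_of_lt_of_le hba (ha _ h')) (lt_irrefl x)
            · exact h
          exact ih (a :: as) bs (by simp at hn ⊢; omega) h1 h2' x hx1 hxbs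

theorem pidIn_iff (pids : List String) (it : List (String × String)) :
    pidIn (PySem.Set.ofList pids) it = true ↔ ∃ s, pidOf it = some s ∧ s ∈ pids := by
  unfold pidIn
  cases hp : pidOf it with
  | none => simp
  | some p => simp [PySem.Set.mem_ofList]

-- ===== VERDICT =====
theorem has_interaction_with_posts_spec : Claim_equal_has_interaction_with_posts := by
  intro uis pids _
  unfold Spec_has_interaction_with_posts has_interaction_with_posts has_interaction_with_posts_alt
  have pw1 : (bCand uis).Pairwise (· ≤ ·) := PySem.List.sorted_pairwise _ _
  have pw2 : (PySem.List.sorted pids (fun x => x) false).Pairwise (· ≤ ·) :=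
    PySem.List.sorted_pairwise _ _
  rw [Bool.eq_iff_iff, aLoop_iff]
  constructor
  · rintro ⟨it, hm, hpid, hty⟩
    rcases (pidIn_iff pids it).mp hpid with ⟨s, hps, hsp⟩
    exact bMerge_complete _ _ _ le_rfl pw1 pw2 s
      ((mem_bCand uis s).mpr ⟨it, hm, (typeOk_eq it) ▸ hty, hps⟩)
      ((PySem.List.mem_sorted _ _ _ _).mpr hsp)
  · intro h
    rcases bMerge_sound _ _ _ le_rfl h with ⟨s, hs1, hs2⟩
    rcases (mem_bCand uis s).mp hs1 with ⟨it, hm, hty, hps⟩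
    exact ⟨it, hm, (pidIn_iff pids it).mpr ⟨s, hps, (PySem.List.mem_sorted _ _ _ _).mp hs2⟩,
      (typeOk_eq it) ▸ hty⟩
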